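-- pv_equiv track=rewrite | github.com/GMAP/visperf | src/pre-processing/viscpu/perf_record.py | cpu_labels
-- ===== SOURCE A (Python) =====
-- def create_cpu_label(cpu):
--     return f"CPU{cpu}"
--
-- def cpu_labels(cpu_setup, cpus_per_row):
--     cpu = []
--     for x, setup_row in enumerate(cpu_setup):
--         row = []
--         for y in range(cpus_per_row):
--             row.append(create_cpu_label(x * cpus_per_row + y))
--         cpu.append(row)
--     return cpu
-- ===== SOURCE B (Python) =====
-- def create_cpu_label(cpu):
--     return f"CPU{cpu}"
--
-- def cpu_labels(cpu_setup, cpus_per_row):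
--     n = len(cpu_setup)
--     flat = [create_cpu_label(i) for i in range(n * cpus_per_row)]
--     return [flat[x * cpus_per_row:(x + 1) * cpus_per_row] for x in range(n)]
-- ===== Notes on version B (the rewrite author's own statement) =====
-- stated objective: alternative
-- what changed: Replaces the nested enumerate/range index-arithmetic loops with a single flat pass generating all labels followed by a slicing pass that partitions the flat list into rows.
import Mathlib
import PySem

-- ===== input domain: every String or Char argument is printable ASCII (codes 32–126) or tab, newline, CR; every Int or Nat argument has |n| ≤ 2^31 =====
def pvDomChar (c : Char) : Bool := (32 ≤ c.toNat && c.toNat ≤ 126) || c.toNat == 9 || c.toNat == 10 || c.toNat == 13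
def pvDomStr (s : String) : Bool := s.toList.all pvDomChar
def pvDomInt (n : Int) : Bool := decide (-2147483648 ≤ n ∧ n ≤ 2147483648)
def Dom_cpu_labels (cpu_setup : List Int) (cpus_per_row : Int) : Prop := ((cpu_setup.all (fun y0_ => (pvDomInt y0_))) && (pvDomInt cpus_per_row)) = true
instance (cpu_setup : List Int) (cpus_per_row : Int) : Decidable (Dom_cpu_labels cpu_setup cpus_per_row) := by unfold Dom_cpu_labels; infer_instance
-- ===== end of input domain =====

-- B builds one flat list of all labels and slices it into rows, replacing A's nested index-arithmetic loops (alternative decomposition, same cost).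
-- ===== PORT A =====
-- f"CPU{cpu}" built on List Char (kernel-transparent); exact for str(int)
def create_cpu_label (cpu : Int) : String :=
  String.ofList ('C' :: 'P' :: 'U' :: PySem.Int.toChars cpu)

def cpu_labels (cpu_setup : List Int) (cpus_per_row : Int) : List (List String) :=
  (PySem.List.enumerate cpu_setup 0).foldl
    (fun cpu p =>
      cpu ++ [(PySem.List.pyRange 0 cpus_per_row 1).foldl
        (fun row y => row ++ [create_cpu_label (p.1 * cpus_per_row + y)]) []])
    []

-- ===== PORT B =====
def cpu_labels_alt (cpu_setup : List Int) (cpus_per_row : Int) : List (List String) :=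
  let n : Int := cpu_setup.length
  let flat := (PySem.List.pyRange 0 (n * cpus_per_row) 1).map create_cpu_label
  (PySem.List.pyRange 0 n 1).map
    (fun x => PySem.List.slice flat (some (x * cpus_per_row)) (some ((x + 1) * cpus_per_row)))

-- ===== PRECONDITION & SPEC =====
def Spec_cpu_labels (cpu_setup : List Int) (cpus_per_row : Int) (out : List (List String)) : Prop := out = cpu_labels_alt cpu_setup cpus_per_row
instance (cpu_setup : List Int) (cpus_per_row : Int) (out : List (List String)) : Decidable (Spec_cpu_labels cpu_setup cpus_per_row out) := by unfold Spec_cpu_labels; infer_instance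

-- ===== CLAIM (what is proved, stated in full; the proofs are below) =====
def Claim_equal_cpu_labels : Prop := ∀ (cpu_setup : List Int) (cpus_per_row : Int), Dom_cpu_labels cpu_setup cpus_per_row → Spec_cpu_labels cpu_setup cpus_per_row (cpu_labels cpu_setup cpus_per_row)

-- ===== LEMMAS AND PROOFS =====
-- row x of A (labels x*k .. x*k+k-1) equals the slice flat[x*k:(x+1)*k] of B's flat list
theorem row_eq (k x : Int) (n : Nat) (hx : 0 ≤ x) (hxn : x < (n : Int)) (lab : Int → String) :
    (PySem.List.pyRange 0 k 1).map (fun y => lab (x * k + y)) =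
    PySem.List.slice ((PySem.List.pyRange 0 ((n : Int) * k) 1).map lab)
      (some (x * k)) (some ((x + 1) * k)) := by
  rcases le_or_gt k 0 with hk | hk
  · rw [PySem.List.pyRange_one_eq_nil hk, PySem.List.pyRange_one_eq_nil (by nlinarith)]
    simp [PySem.List.slice]
  · have h1 : (0:Int) ≤ x * k := by positivity
    have h2 : (0:Int) ≤ (x+1) * k := by positivity
    have hA : x * k + k = (x + 1) * k := by ring
    have hB : (x + 1) * k ≤ (n : Int) * k := by nlinarith
    rw [PySem.List.slice_toNat _ h1 h2]
    apply List.ext_getElem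
    · simp [PySem.List.length_pyRange_one]
      omega
    · intro i hi1 hi2
      simp only [List.getElem_take, List.getElem_drop, List.getElem_map,
        PySem.List.getElem_pyRange_one]
      congr 1
      simp [PySem.List.length_pyRange_one] at hi1
      omega

theorem cpu_labels_spec : Claim_equal_cpu_labels := by
  intro cs k _
  unfold Spec_cpu_labels cpu_labels cpu_labels_alt
  simp only [PySem.List.foldl_append_singleton_eq_map]
  have h := PySem.List.map_fst_enumerate cs 0
  calc (PySem.List.enumerate cs 0).map (fun p =>
          (PySem.List.pyRange 0 k 1).map (fun y => create_cpu_label (p.1 * k + y)))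
      = ((PySem.List.enumerate cs 0).map (·.1)).map (fun x =>
          (PySem.List.pyRange 0 k 1).map (fun y => create_cpu_label (x * k + y))) := by
        rw [List.map_map]; rfl
    _ = (PySem.List.pyRange 0 (cs.length : Int) 1).map (fun x =>
          (PySem.List.pyRange 0 k 1).map (fun y => create_cpu_label (x * k + y))) := by
        rw [h]; norm_num
    _ = _ := by
        apply List.map_congr_left
        intro x hxmem
        rw [PySem.List.mem_pyRange_one] at hxmem
        exact row_eq k x cs.length hxmem.1 hxmem.2 create_cpu_label
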